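-- pv_equiv track=rewrite | github.com/isty2e/einf | tests/test_dim_solver.py | _classify_h_w_addition_target
-- ===== SOURCE A (Python) =====
-- def _classify_h_w_addition_target(target: int) -> str:
--     """Brute-force classify h+w=target over small non-negative domain."""
--     solutions: list[tuple[int, int]] = []
--     for h in range(0, 33):
--         for w in range(0, 33):
--             if h + w == target:
--                 solutions.append((h, w))
--                 if len(solutions) >= 2:
--                     return "ambiguous"
--     if len(solutions) == 1:
--         return "unique"
--     return "inconsistent"
-- ===== SOURCE B (Python) =====
-- def _classify_h_w_addition_target(target: int) -> str:
--     """Closed-form classify h+w=target over h,w in [0,32]."""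
--     lo = max(0, target - 32)
--     hi = min(32, target)
--     count = hi - lo + 1 if hi >= lo else 0
--     if count == 0:
--         return "inconsistent"
--     if count == 1:
--         return "unique"
--     return "ambiguous"
-- ===== Notes on version B (the rewrite author's own statement) =====
-- stated objective: simpler
-- what changed: Replaced the 33x33 brute-force double loop with a closed-form count of valid h in [max(0,target-32), min(32,target)], no loops.
import Mathlib
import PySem

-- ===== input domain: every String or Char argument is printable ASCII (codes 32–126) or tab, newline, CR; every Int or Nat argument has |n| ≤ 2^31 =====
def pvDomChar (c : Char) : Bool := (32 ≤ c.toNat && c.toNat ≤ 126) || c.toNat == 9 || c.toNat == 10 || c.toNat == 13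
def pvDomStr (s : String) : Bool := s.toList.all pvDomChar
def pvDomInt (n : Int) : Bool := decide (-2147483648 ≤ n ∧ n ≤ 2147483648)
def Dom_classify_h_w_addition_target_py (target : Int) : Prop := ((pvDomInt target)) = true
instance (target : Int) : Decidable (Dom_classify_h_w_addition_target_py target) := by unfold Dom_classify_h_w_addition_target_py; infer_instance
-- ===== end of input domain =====

-- B replaces A's 33x33 brute-force double loop with a closed-form interval count (simpler, loop-free).


-- ===== PORT A =====
-- inner loop: `for w in range(0,33)` with the early `return "ambiguous"`
def pvLoopW (target h : Int) (ws : List Int) (sols : List (Int × Int)) :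
    Except String (List (Int × Int)) :=
  match ws with
  | [] => .ok sols
  | w :: rest =>
    if h + w == target then
      let sols' := sols ++ [(h, w)]
      if sols'.length ≥ 2 then .error "ambiguous"
      else pvLoopW target h rest sols'
    else pvLoopW target h rest sols

-- outer loop: `for h in range(0,33)`
def pvLoopH (target : Int) (hs : List Int) (sols : List (Int × Int)) :
    Except String (List (Int × Int)) :=
  match hs with
  | [] => .ok sols
  | h :: rest =>
    match pvLoopW target h (PySem.List.pyRange 0 33 1) sols with
    | .error s => .error s
    | .ok sols' => pvLoopH target rest sols'

def classify_h_w_addition_target_py (target : Int) : String :=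
  match pvLoopH target (PySem.List.pyRange 0 33 1) [] with
  | .error s => s
  | .ok sols => if sols.length == 1 then "unique" else "inconsistent"

-- ===== PORT B =====
def classify_h_w_addition_target_py_alt (target : Int) : String :=
  let lo := max 0 (target - 32)
  let hi := min 32 target
  let count := if hi ≥ lo then hi - lo + 1 else 0
  if count == 0 then "inconsistent"
  else if count == 1 then "unique"
  else "ambiguous"

-- ===== PRECONDITION & SPEC =====
def Spec_classify_h_w_addition_target_py (target : Int) (out : String) : Prop := out = classify_h_w_addition_target_py_alt target
instance (target : Int) (out : String) : Decidable (Spec_classify_h_w_addition_target_py target out) := by unfold Spec_classify_h_w_addition_target_py; infer_instance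

-- ===== CLAIM (what is proved, stated in full; the proofs are below) =====
def Claim_equal_classify_h_w_addition_target_py : Prop := ∀ (target : Int), Dom_classify_h_w_addition_target_py target → Spec_classify_h_w_addition_target_py target (classify_h_w_addition_target_py target)

-- ===== LEMMAS AND PROOFS =====

-- if no w in the list solves h + w = target, the inner loop leaves sols untouched
theorem pvLoopW_no_hit (target h : Int) (ws : List Int) (sols : List (Int × Int))
    (hno : ∀ w ∈ ws, h + w ≠ target) : pvLoopW target h ws sols = .ok sols := by
  induction ws with
  | nil => rfl
  | cons w rest ih =>
    have h1 : h + w ≠ target := hno w (List.mem_cons_self)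
    simp only [pvLoopW, beq_iff_eq, if_neg h1]
    exact ih (fun x hx => hno x (List.mem_cons_of_mem _ hx))

theorem pvRange33_mem (w : Int) (hw : w ∈ PySem.List.pyRange 0 33 1) : 0 ≤ w ∧ w ≤ 32 := by
  have : PySem.List.pyRange 0 33 1 =
      [0,1,2,3,4,5,6,7,8,9,10,11,12,13,14,15,16,17,18,19,20,21,22,23,24,25,26,27,28,29,30,31,32] := by
    decide
  rw [this] at hw
  fin_cases hw <;> omega

theorem pvLoopH_no_hit (target : Int) (hs : List Int) (sols : List (Int × Int))
    (hhs : ∀ h ∈ hs, 0 ≤ h ∧ h ≤ 32)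
    (hno : target < 0 ∨ 64 < target) : pvLoopH target hs sols = .ok sols := by
  induction hs with
  | nil => rfl
  | cons h rest ih =>
    have hhb := hhs h (List.mem_cons_self)
    have hw : pvLoopW target h (PySem.List.pyRange 0 33 1) sols = .ok sols := by
      apply pvLoopW_no_hit
      intro w hwmem
      have hb := pvRange33_mem w hwmem
      omega
    simp [pvLoopH, hw, ih (fun x hx => hhs x (List.mem_cons_of_mem _ hx))]

-- ===== VERDICT (by name: the statement is the Claim_ definition above) =====
theorem classify_h_w_addition_target_py_spec : Claim_equal_classify_h_w_addition_target_py := by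
  intro target _
  unfold Spec_classify_h_w_addition_target_py
  by_cases hin : 0 ≤ target ∧ target ≤ 64
  · obtain ⟨h1, h2⟩ := hin
    interval_cases target <;> decide
  · have hno : target < 0 ∨ 64 < target := by omega
    have hA : classify_h_w_addition_target_py target = "inconsistent" := by
      unfold classify_h_w_addition_target_py
      rw [pvLoopH_no_hit target _ [] (fun h hm => pvRange33_mem h hm) hno]
      rfl
    have hB : classify_h_w_addition_target_py_alt target = "inconsistent" := by
      unfold classify_h_w_addition_target_py_alt
      have : ¬ (min 32 target ≥ max 0 (target - 32)) := by omega
      simp [this]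
    rw [hA, hB]
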